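-- pv_equiv track=rewrite | github.com/sresis/practice-problems | remove-array-elements/rm-arr-elements.py | remove_array_elements
-- ===== SOURCE A (Python) =====
-- def remove_array_elements(arr, ranges):
--     # see if each element is any of the banned ranges
--     final_range = []
--     for i in range(len(arr)):
--         incorrect_count = 0
--
--         for item in ranges:
--             if i >= item[0] and i < item[1]:
--                 incorrect_count += 1
--         if incorrect_count == 0:
--             final_range.append(arr[i])
--     return final_range
--
--
--
--     return [0,1]
-- ===== SOURCE B (Python) =====
-- def remove_array_elements(arr, ranges):
--     # Difference map over index boundaries, then a single prefix-sum pass.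
--     n = len(arr)
--     delta = {}
--     for item in ranges:
--         lo = max(item[0], 0)
--         hi = min(item[1], n)
--         if lo < hi:
--             delta[lo] = delta.get(lo, 0) + 1
--             delta[hi] = delta.get(hi, 0) - 1
--     out = []
--     cover = 0
--     for i, x in enumerate(arr):
--         cover += delta.get(i, 0)
--         if cover == 0:
--             out.append(x)
--     return out
-- ===== Notes on version B (the rewrite author's own statement) =====
-- stated objective: faster
-- what changed: Replaced the per-index scan over all ranges (O(n*m)) by a difference map of clamped range boundaries plus one prefix-sum pass over the array (O(n+m)).
import Mathlib
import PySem

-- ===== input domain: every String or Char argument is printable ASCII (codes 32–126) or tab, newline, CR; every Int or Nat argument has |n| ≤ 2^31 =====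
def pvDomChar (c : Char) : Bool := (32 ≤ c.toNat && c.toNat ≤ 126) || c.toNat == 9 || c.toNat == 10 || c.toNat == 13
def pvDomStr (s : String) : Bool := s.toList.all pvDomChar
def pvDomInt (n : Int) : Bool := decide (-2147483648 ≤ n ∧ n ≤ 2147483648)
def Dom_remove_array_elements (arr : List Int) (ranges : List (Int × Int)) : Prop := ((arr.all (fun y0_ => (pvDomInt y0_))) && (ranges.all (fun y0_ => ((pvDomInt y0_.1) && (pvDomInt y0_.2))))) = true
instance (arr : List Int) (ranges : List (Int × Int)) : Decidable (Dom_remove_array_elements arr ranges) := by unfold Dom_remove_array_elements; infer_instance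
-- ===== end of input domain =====

-- B replaces A's per-index scan over all ranges by a boundary difference map plus one prefix-sum pass (faster).

-- ===== PORT A =====
def remove_array_elements (arr : List Int) (ranges : List (Int × Int)) : List Int :=
  (PySem.List.pyRange 0 (arr.length : Int) 1).foldl (fun final_range i =>
    if (ranges.foldl (fun c item => if i ≥ item.1 ∧ i < item.2 then c + 1 else c) (0 : Int)) = 0
    then final_range ++ [PySem.List.pyGetD arr i 0] else final_range) []

-- ===== PORT B =====
-- one iteration of B's first loop: clamp the range, then delta[lo] += 1; delta[hi] -= 1
def bDeltaStep (n : Int) (d : PySem.Dict Int Int) (item : Int × Int) : PySem.Dict Int Int :=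
  if max item.1 0 < min item.2 n then
    (d.insert (max item.1 0) (d.getD (max item.1 0) 0 + 1)).insert (min item.2 n)
      ((d.insert (max item.1 0) (d.getD (max item.1 0) 0 + 1)).getD (min item.2 n) 0 - 1)
  else d

def remove_array_elements_alt (arr : List Int) (ranges : List (Int × Int)) : List Int :=
  let delta := ranges.foldl (bDeltaStep (arr.length : Int)) PySem.Dict.empty
  ((PySem.List.enumerate arr 0).foldl (fun (p : List Int × Int) e =>
      (if p.2 + delta.getD e.1 0 = 0 then p.1 ++ [e.2] else p.1, p.2 + delta.getD e.1 0))
    ([], 0)).1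

-- ===== PRECONDITION & SPEC =====
def Spec_remove_array_elements (arr : List Int) (ranges : List (Int × Int)) (out : List Int) : Prop := out = remove_array_elements_alt arr ranges
instance (arr : List Int) (ranges : List (Int × Int)) (out : List Int) : Decidable (Spec_remove_array_elements arr ranges out) := by unfold Spec_remove_array_elements; infer_instance

-- ===== CLAIM (what is proved, stated in full; the proofs are below) =====
def Claim_equal_remove_array_elements : Prop := ∀ (arr : List Int) (ranges : List (Int × Int)), Dom_remove_array_elements arr ranges → Spec_remove_array_elements arr ranges (remove_array_elements arr ranges)

-- ===== LEMMAS AND PROOFS =====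

-- count of ranges covering index i (A's inner loop)
def pvCnt (ranges : List (Int × Int)) (i : Int) : Int :=
  ranges.foldl (fun c item => if i ≥ item.1 ∧ i < item.2 then c + 1 else c) 0

-- prefix sum of the difference map over indices 0..m-1 (B's running cover after m steps)
def pvCov (d : PySem.Dict Int Int) (m : Nat) : Int :=
  ((List.range m).map (fun j => d.getD (j : Int) 0)).sum

theorem pvCov_succ (d : PySem.Dict Int Int) (m : Nat) :
    pvCov d (m + 1) = pvCov d m + d.getD (m : Int) 0 := by
  simp [pvCov, List.range_succ]

theorem pvCov_insert (d : PySem.Dict Int Int) (k v : Int) (m : Nat) :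
    pvCov (d.insert k v) m
      = pvCov d m + (if 0 ≤ k ∧ k < (m : Int) then v - d.getD k 0 else 0) := by
  induction m with
  | zero =>
    simp [pvCov]
  | succ m ih =>
    rw [pvCov_succ, pvCov_succ, ih, PySem.Dict.getD_insert]
    by_cases hk : (m : Int) = k
    · subst hk
      rw [if_pos rfl]
      split_ifs <;> omega
    · rw [if_neg hk]
      split_ifs <;> omega

theorem pvCov_step (n : Int) (d : PySem.Dict Int Int) (r : Int × Int) (i : Int)
    (h0 : 0 ≤ i) (hn : i < n) :
    pvCov (bDeltaStep n d r) (i.toNat + 1)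
      = pvCov d (i.toNat + 1) + (if i ≥ r.1 ∧ i < r.2 then 1 else 0) := by
  unfold bDeltaStep
  by_cases hlh : max r.1 0 < min r.2 n
  · rw [if_pos hlh, pvCov_insert, pvCov_insert]
    split_ifs <;> omega
  · rw [if_neg hlh]
    have h : ¬ (i ≥ r.1 ∧ i < r.2) := by omega
    simp [h]

theorem pvCov_foldl (n : Int) (ranges : List (Int × Int)) (d : PySem.Dict Int Int)
    (i : Int) (h0 : 0 ≤ i) (hn : i < n) :
    pvCov (ranges.foldl (bDeltaStep n) d) (i.toNat + 1)
      = pvCov d (i.toNat + 1) + pvCnt ranges i := by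
  induction ranges generalizing d with
  | nil => simp [pvCnt]
  | cons r rest ih =>
    have hcnt : pvCnt (r :: rest) i = pvCnt rest i + (if i ≥ r.1 ∧ i < r.2 then 1 else 0) := by
      simp only [pvCnt, List.foldl_cons]
      rw [PySem.List.foldl_ite_add_one, PySem.List.foldl_ite_add_one]
      split_ifs <;> ring
    rw [List.foldl_cons, ih (bDeltaStep n d r), pvCov_step n d r i h0 hn, hcnt]
    ring

theorem pvCov_bDelta (n : Int) (ranges : List (Int × Int)) (i : Int)
    (h0 : 0 ≤ i) (hn : i < n) :
    pvCov (ranges.foldl (bDeltaStep n) PySem.Dict.empty) (i.toNat + 1) = pvCnt ranges i := by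
  rw [pvCov_foldl n ranges _ i h0 hn]
  simp [pvCov, PySem.Dict.getD_empty]

-- B's second loop, generalized over the start index and accumulator
theorem pvB_loop (delta : PySem.Dict Int Int) (l : List Int) (k : Nat) (acc : List Int)
    (c : Int) (hc : c = pvCov delta k) :
    (PySem.List.enumerate l (k : Int)).foldl (fun (p : List Int × Int) e =>
        (if p.2 + delta.getD e.1 0 = 0 then p.1 ++ [e.2] else p.1, p.2 + delta.getD e.1 0)) (acc, c)
      = (acc ++ ((PySem.List.enumerate l (k : Int)).filter
            (fun e => decide (pvCov delta (e.1.toNat + 1) = 0))).map (·.2),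
         pvCov delta (k + l.length)) := by
  induction l generalizing k acc c with
  | nil => simp [PySem.List.enumerate_nil, hc]
  | cons x t ih =>
    subst hc
    rw [PySem.List.enumerate_cons]
    simp only [List.foldl_cons, List.filter_cons]
    have hnew : pvCov delta k + delta.getD (k : Int) 0 = pvCov delta (k + 1) :=
      (pvCov_succ delta k).symm
    have hpc : ((k : Int) + 1) = ((k + 1 : Nat) : Int) := by push_cast; ring
    rw [hnew, hpc, ih (k + 1) _ _ rfl]
    simp only [Int.toNat_natCast]
    by_cases hz : pvCov delta (k + 1) = 0
    · simp [hz, List.length_cons]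
      have e : k + 1 + t.length = k + (t.length + 1) := by omega
      rw [e]
    · simp [hz, List.length_cons]
      have : k + 1 + t.length = k + (t.length + 1) := by omega
      rw [this]

-- A as a filter over indices
theorem pvA_eq (arr : List Int) (ranges : List (Int × Int)) :
    remove_array_elements arr ranges
      = ((PySem.List.pyRange 0 (arr.length : Int) 1).filter
          (fun i => decide (pvCnt ranges i = 0))).map (fun i => PySem.List.pyGetD arr i 0) := by
  unfold remove_array_elements
  rw [PySem.List.foldl_append_ite
      (p := fun i => (ranges.foldl (fun c item => if i ≥ item.1 ∧ i < item.2 then c + 1 else c) (0 : Int)) = 0)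
      (f := fun i => PySem.List.pyGetD arr i 0)]
  simp only [List.nil_append]
  rfl

-- B as a filter over the enumerated array
theorem pvB_eq (arr : List Int) (ranges : List (Int × Int)) :
    remove_array_elements_alt arr ranges
      = ((PySem.List.enumerate arr 0).filter
          (fun e => decide (pvCov (ranges.foldl (bDeltaStep (arr.length : Int)) PySem.Dict.empty) (e.1.toNat + 1) = 0))).map (·.2) := by
  unfold remove_array_elements_alt
  have h := pvB_loop (ranges.foldl (bDeltaStep (arr.length : Int)) PySem.Dict.empty) arr 0 [] 0
    (by simp [pvCov])
  simp only [Nat.cast_zero] at h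
  simpa using congrArg Prod.fst h

-- ===== VERDICT (by name: the statement is the Claim_ definition above) =====
theorem remove_array_elements_spec : Claim_equal_remove_array_elements := by
  intro arr ranges _
  unfold Spec_remove_array_elements
  rw [pvA_eq, pvB_eq]
  rw [PySem.List.enumerate_eq_map_pyRange (xs := arr) (d := 0)]
  rw [List.filter_map, List.map_map]
  simp only [PySem.List.len_eq]
  apply congrArg
  apply List.filter_congr
  intro i hi
  rw [PySem.List.mem_pyRange_one] at hi
  simp only [Function.comp]
  rw [pvCov_bDelta (arr.length : Int) ranges i hi.1 hi.2]
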